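-- pv_equiv track=rewrite | github.com/saimaz/AdventOfCode | 2023/d03/s1.py | check_for_symbol
-- ===== SOURCE A (Python) =====
-- def is_symbol(ch):
--     return ch not in '0123456789.'
--
-- def check_for_symbol(i, j, number_length, engine_map):
--     directions = [
--         (-1, -1), (-1, 0), (-1, 1),
--         (0, -1),           (0, 1),
--         (1, -1),  (1, 0),  (1, 1)
--     ]
--     for n in range(number_length):
--         for dx, dy in directions:
--             nx, ny = i + dx, j + n + dy
--             if 0 <= nx < len(engine_map) and 0 <= ny < len(engine_map[nx]) and is_symbol(engine_map[nx][ny]):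
--                 return True
--     return False
-- ===== SOURCE B (Python) =====
-- def is_symbol(ch):
--     return ch not in '0123456789.'
--
-- def cell_has_symbol(engine_map, x, y):
--     return 0 <= x < len(engine_map) and 0 <= y < len(engine_map[x]) and is_symbol(engine_map[x][y])
--
-- def check_for_symbol(i, j, number_length, engine_map):
--     # scan the ring of cells surrounding the number's span: the full rows
--     # above and below, and the two cells flanking it on its own row
--     cols = range(j - 1, j + number_length + 1)
--     if any(cell_has_symbol(engine_map, i - 1, y) for y in cols):
--         return True
--     if any(cell_has_symbol(engine_map, i + 1, y) for y in cols):
--         return True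
--     return cell_has_symbol(engine_map, i, j - 1) or cell_has_symbol(engine_map, i, j + number_length)
-- ===== Notes on version B (the rewrite author's own statement) =====
-- stated objective: simpler
-- what changed: Replaces A's per-digit loop over 8 direction offsets (8*n cell tests with duplicates) by a single scan of the ring of cells surrounding the number's span: the row above, the row below, and the two flanking cells on its own row.
-- intended difference: On malformed grids where a symbol character sits on one of the number's own digit cells (number_length >= 2) while no cell truly adjacent to the span holds a symbol, A returns True because it scans the number's own cells as neighbours; B returns False, the intended answer, since a number's own cells are not its neighbours. — e.g. on check_for_symbol(0, 0, 2, ["1#"]): A returns true, B returns false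
-- outside the precondition, e.g. on check_for_symbol(0, 1, 0, ['###']): A returns False, B returns True
import Mathlib
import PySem

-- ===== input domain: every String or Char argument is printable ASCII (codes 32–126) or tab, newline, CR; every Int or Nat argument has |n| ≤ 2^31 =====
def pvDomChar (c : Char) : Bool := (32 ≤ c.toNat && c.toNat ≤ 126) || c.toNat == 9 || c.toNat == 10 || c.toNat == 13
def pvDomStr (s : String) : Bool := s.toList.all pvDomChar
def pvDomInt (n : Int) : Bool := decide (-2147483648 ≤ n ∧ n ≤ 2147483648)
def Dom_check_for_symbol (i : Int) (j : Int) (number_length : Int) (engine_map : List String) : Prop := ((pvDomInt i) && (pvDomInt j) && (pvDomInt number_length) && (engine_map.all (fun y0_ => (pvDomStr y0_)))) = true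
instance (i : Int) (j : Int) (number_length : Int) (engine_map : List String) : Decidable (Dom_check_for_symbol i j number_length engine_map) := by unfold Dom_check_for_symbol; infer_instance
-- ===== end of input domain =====

-- B replaces A's per-digit 8-direction loop by one scan of the ring of cells surrounding the
-- number's span (objective: simpler decomposition); on inputs where a symbol sits only on the
-- number's own digit cells (malformed grids) A accidentally reports True — stated as D_ below.

-- ===== PORT A =====
-- 'ch not in "0123456789."' for a single character is exactly list non-membership
def is_symbol (ch : Char) : Bool := !("0123456789.".toList.contains ch)

-- the per-cell condition both Pythons evaluate, verbatim:
-- 0 <= x < len(engine_map) and 0 <= y < len(engine_map[x]) and is_symbol(engine_map[x][y])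
-- (B's helper cell_has_symbol; A writes the same expression inline in its loop)
def cell_has_symbol (engine_map : List String) (x : Int) (y : Int) : Bool :=
  decide (0 ≤ x) && decide (x < PySem.List.len engine_map) &&
    (match PySem.List.pyGet? engine_map x with
     | some row =>
       decide (0 ≤ y) && decide (y < PySem.Str.len row) &&
         (match PySem.Str.pyGet? row y with
          | some c => is_symbol c
          | none => false)
     | none => false)

def directions : List (Int × Int) :=
  [(-1, -1), (-1, 0), (-1, 1),
   (0, -1),           (0, 1),
   (1, -1), (1, 0), (1, 1)]

def check_for_symbol (i : Int) (j : Int) (number_length : Int) (engine_map : List String) : Bool :=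
  -- for n in range(number_length): for dx, dy in directions:
  --   nx, ny = i + dx, j + n + dy
  --   if <the cell condition above, inline>: return True
  -- return False
  (PySem.List.pyRange 0 number_length 1).any (fun n =>
    directions.any (fun d =>
      cell_has_symbol engine_map (i + d.1) (j + n + d.2)))

-- ===== PORT B =====
def check_for_symbol_alt (i : Int) (j : Int) (number_length : Int) (engine_map : List String) : Bool :=
  let cols := PySem.List.pyRange (j - 1) (j + number_length + 1) 1
  if cols.any (fun y => cell_has_symbol engine_map (i - 1) y) then true
  else if cols.any (fun y => cell_has_symbol engine_map (i + 1) y) then true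
  else cell_has_symbol engine_map i (j - 1) || cell_has_symbol engine_map i (j + number_length)

-- ===== PRECONDITION & SPEC =====
-- Pre_ excludes number_length ≤ 0, a malformed digit count outside the function's natural
-- domain (a number has at least one digit); A returns False there by an empty loop.
def Pre_check_for_symbol (i : Int) (j : Int) (number_length : Int) (engine_map : List String) : Prop :=
  1 ≤ number_length
instance (i : Int) (j : Int) (number_length : Int) (engine_map : List String) : Decidable (Pre_check_for_symbol i j number_length engine_map) := by unfold Pre_check_for_symbol; infer_instance

def pvWitness_check_for_symbol : Int × Int × Int × List String := (0, 0, 1, ["*"])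

-- used only by D_: does row x hold a symbol in columns [a, b)? (its own formulation, not the ports' code)
def symIn (engine_map : List String) (x a w : Int) : Prop :=
  0 ≤ x ∧ (((engine_map.getD x.toNat "").toList.take (a + w).toNat).drop a.toNat).any is_symbol

-- On grids where a symbol character sits on one of the number's own digit cells
-- (number_length >= 2) while no cell truly adjacent to the span holds a symbol, A returns
-- True (it scans the number's own cells as "neighbours"); B returns False, the intended
-- answer, since a number's own cells are not its neighbours.
def D_check_for_symbol (i : Int) (j : Int) (number_length : Int) (engine_map : List String) : Prop :=
  2 ≤ number_length ∧ symIn engine_map i j number_length ∧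
  ¬ cell_has_symbol engine_map i (-1 + j) ∧
  ¬ cell_has_symbol engine_map i (number_length + j) ∧
  ∀ x ∈ [-1 + i, 1 + i], ¬ symIn engine_map x (-1 + j) (2 + number_length)

instance (i : Int) (j : Int) (number_length : Int) (engine_map : List String) : Decidable (D_check_for_symbol i j number_length engine_map) := by unfold D_check_for_symbol symIn; infer_instance

def Spec_check_for_symbol (i : Int) (j : Int) (number_length : Int) (engine_map : List String) (out : Bool) : Prop := ¬ D_check_for_symbol i j number_length engine_map → out = check_for_symbol_alt i j number_length engine_map
instance (i : Int) (j : Int) (number_length : Int) (engine_map : List String) (out : Bool) : Decidable (Spec_check_for_symbol i j number_length engine_map out) := by unfold Spec_check_for_symbol; infer_instance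

def pvDiffWitness_check_for_symbol : Int × Int × Int × List String := (0, 0, 2, ["1#"])
def pvDiffWitnessOut_check_for_symbol : Bool × Bool := (true, false)

-- ===== CLAIM (what is proved, stated in full; the proofs are below) =====
def Claim_unchanged_check_for_symbol : Prop := ∀ (i : Int) (j : Int) (number_length : Int) (engine_map : List String), Dom_check_for_symbol i j number_length engine_map → Pre_check_for_symbol i j number_length engine_map → Spec_check_for_symbol i j number_length engine_map (check_for_symbol i j number_length engine_map)
def Claim_changed_check_for_symbol : Prop := Dom_check_for_symbol (pvDiffWitness_check_for_symbol.1) (pvDiffWitness_check_for_symbol.2.1) (pvDiffWitness_check_for_symbol.2.2.1) (pvDiffWitness_check_for_symbol.2.2.2) ∧ Pre_check_for_symbol (pvDiffWitness_check_for_symbol.1) (pvDiffWitness_check_for_symbol.2.1) (pvDiffWitness_check_for_symbol.2.2.1) (pvDiffWitness_check_for_symbol.2.2.2) ∧ D_check_for_symbol (pvDiffWitness_check_for_symbol.1) (pvDiffWitness_check_for_symbol.2.1) (pvDiffWitness_check_for_symbol.2.2.1) (pvDiffWitness_check_for_symbol.2.2.2) ∧ check_for_symbol (pvDiffWitness_check_for_symbol.1)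 (pvDiffWitness_check_for_symbol.2.1) (pvDiffWitness_check_for_symbol.2.2.1) (pvDiffWitness_check_for_symbol.2.2.2) = pvDiffWitnessOut_check_for_symbol.1 ∧ check_for_symbol_alt (pvDiffWitness_check_for_symbol.1) (pvDiffWitness_check_for_symbol.2.1) (pvDiffWitness_check_for_symbol.2.2.1) (pvDiffWitness_check_for_symbol.2.2.2) = pvDiffWitnessOut_check_for_symbol.2 ∧ pvDiffWitnessOut_check_for_symbol.1 ≠ pvDiffWitnessOut_check_for_symbol.2
def Claim_exact_check_for_symbol : Prop := ∀ (i : Int) (j : Int) (number_length : Int) (engine_map : List String), Dom_check_for_symbol i j number_length engine_map → Pre_check_for_symbol i j number_length engine_map → D_check_for_symbol i j number_length engine_map → check_for_symbol i j number_length engine_map ≠ check_for_symbol_alt i j number_length engine_map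

-- ===== LEMMAS AND PROOFS =====

theorem A_iff (i j L : Int) (em : List String) :
    check_for_symbol i j L em = true ↔
      ∃ n, 0 ≤ n ∧ n < L ∧ ∃ d ∈ directions,
        cell_has_symbol em (i + d.1) (j + n + d.2) = true := by
  unfold check_for_symbol
  rw [List.any_eq_true]
  constructor
  · rintro ⟨n, hn, hb⟩
    rw [PySem.List.mem_pyRange_one] at hn
    rw [List.any_eq_true] at hb
    obtain ⟨d, hd, hcell⟩ := hb
    exact ⟨n, hn.1, hn.2, d, hd, hcell⟩
  · rintro ⟨n, h0, hL, d, hd, hcell⟩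
    refine ⟨n, PySem.List.mem_pyRange_one.2 ⟨h0, hL⟩, ?_⟩
    rw [List.any_eq_true]
    exact ⟨d, hd, hcell⟩

theorem B_iff (i j L : Int) (em : List String) :
    check_for_symbol_alt i j L em = true ↔
      ((∃ y, j - 1 ≤ y ∧ y < j + L + 1 ∧
          (cell_has_symbol em (i - 1) y = true ∨ cell_has_symbol em (i + 1) y = true)) ∨
        cell_has_symbol em i (j - 1) = true ∨ cell_has_symbol em i (j + L) = true) := by
  unfold check_for_symbol_alt
  simp only []
  split_ifs with h1 h2
  · rw [List.any_eq_true] at h1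
    obtain ⟨y, hy, hc⟩ := h1
    rw [PySem.List.mem_pyRange_one] at hy
    simp only [true_iff]
    exact Or.inl ⟨y, hy.1, hy.2, Or.inl hc⟩
  · rw [List.any_eq_true] at h2
    obtain ⟨y, hy, hc⟩ := h2
    rw [PySem.List.mem_pyRange_one] at hy
    simp only [true_iff]
    exact Or.inl ⟨y, hy.1, hy.2, Or.inr hc⟩
  · rw [Bool.or_eq_true]
    constructor
    · rintro (h | h)
      · exact Or.inr (Or.inl h)
      · exact Or.inr (Or.inr h)
    · rintro (⟨y, hy1, hy2, hc | hc⟩ | h | h)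
      · exact absurd (List.any_eq_true.2 ⟨y, PySem.List.mem_pyRange_one.2 ⟨hy1, hy2⟩, hc⟩) h1
      · exact absurd (List.any_eq_true.2 ⟨y, PySem.List.mem_pyRange_one.2 ⟨hy1, hy2⟩, hc⟩) h2
      · exact Or.inl h
      · exact Or.inr h

theorem cell_char (em : List String) (x y : Int) (hx0 : 0 ≤ x) (hxl : x.toNat < em.length)
    (hy0 : 0 ≤ y) (hyl : y.toNat < (em[x.toNat]'hxl).toList.length) :
    cell_has_symbol em x y = is_symbol ((em[x.toNat]'hxl).toList[y.toNat]'hyl) := by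
  unfold cell_has_symbol
  rw [PySem.List.pyGet?_of_nonneg em hx0, List.getElem?_eq_getElem hxl]
  dsimp only
  rw [PySem.Str.pyGet?_eq, PySem.Chars.pyGet?_eq_listPyGet?,
    PySem.List.pyGet?_of_nonneg _ hy0, List.getElem?_eq_getElem hyl]
  rw [decide_eq_true hx0, decide_eq_true hy0, Bool.true_and, Bool.true_and]
  have h2 : decide (x < PySem.List.len em) = true := by
    rw [PySem.List.len_eq]; simp only [decide_eq_true_eq]; omega
  have h4 : decide (y < PySem.Str.len (em[x.toNat]'hxl)) = true := by
    rw [PySem.Str.len_eq]; simp only [decide_eq_true_eq]; omega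
  rw [h2, h4, Bool.true_and, Bool.true_and]

theorem cell_oob_x (em : List String) (x y : Int) (h : ¬ (0 ≤ x ∧ x.toNat < em.length)) :
    cell_has_symbol em x y = false := by
  unfold cell_has_symbol
  by_cases hx0 : 0 ≤ x
  · have h2 : decide (x < PySem.List.len em) = false := by
      rw [PySem.List.len_eq]; simp only [decide_eq_false_iff_not, not_lt]; omega
    rw [h2, Bool.and_false, Bool.false_and]
  · rw [decide_eq_false hx0]
    simp

theorem cell_oob_y (em : List String) (x y : Int) (hx0 : 0 ≤ x) (hxl : x.toNat < em.length)
    (h : ¬ (0 ≤ y ∧ y.toNat < (em[x.toNat]'hxl).toList.length)) :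
    cell_has_symbol em x y = false := by
  unfold cell_has_symbol
  rw [PySem.List.pyGet?_of_nonneg em hx0, List.getElem?_eq_getElem hxl]
  dsimp only
  by_cases hy0 : 0 ≤ y
  · have h4 : decide (y < PySem.Str.len (em[x.toNat]'hxl)) = false := by
      rw [PySem.Str.len_eq]; simp only [decide_eq_false_iff_not, not_lt]; omega
    rw [h4, Bool.and_false, Bool.false_and, Bool.and_false]
  · rw [decide_eq_false hy0]
    simp

theorem symIn_iff (em : List String) (x a w : Int) :
    symIn em x a w ↔ ∃ y : Int, a ≤ y ∧ y < a + w ∧ cell_has_symbol em x y = true := by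
  unfold symIn
  by_cases hx0 : 0 ≤ x
  · rw [and_iff_right hx0]
    by_cases hxl : x.toNat < em.length
    · have hrow : em.getD x.toNat "" = em[x.toNat]'hxl := by
        rw [(List.getD_eq_getElem?_getD (l := em) (i := x.toNat) (a := "")),
          List.getElem?_eq_getElem hxl, Option.getD_some]
      rw [hrow, List.any_eq_true]
      constructor
      · rintro ⟨c, hmem, hsym⟩
        obtain ⟨k, hk, hck⟩ := List.mem_iff_getElem.1 hmem
        have hk' := hk
        rw [List.length_drop, List.length_take] at hk'
        have hmin1 : min (a + w).toNat (em[x.toNat]'hxl).toList.length ≤ (a + w).toNat :=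
          Nat.min_le_left _ _
        have hmin2 : min (a + w).toNat (em[x.toNat]'hxl).toList.length ≤
            (em[x.toNat]'hxl).toList.length := Nat.min_le_right _ _
        have hkb : a.toNat + k < (a + w).toNat := by omega
        have hlen2 : a.toNat + k < (em[x.toNat]'hxl).toList.length := by omega
        have hel : (((em[x.toNat]'hxl).toList.take (a + w).toNat).drop a.toNat)[k]'hk =
            (em[x.toNat]'hxl).toList[a.toNat + k]'(by omega) := by
          rw [List.getElem_drop, List.getElem_take]
        refine ⟨((a.toNat + k : Nat) : Int), by omega, by omega, ?_⟩
        rw [cell_char em x _ hx0 hxl (by omega) (by omega)]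
        simp only [Int.toNat_natCast]
        rw [← hel, hck]
        exact hsym
      · rintro ⟨y, hay, hyb, hcell⟩
        by_cases hy : 0 ≤ y ∧ y.toNat < (em[x.toNat]'hxl).toList.length
        · rw [cell_char em x y hx0 hxl hy.1 hy.2] at hcell
          refine ⟨(em[x.toNat]'hxl).toList[y.toNat]'hy.2, ?_, hcell⟩
          rw [List.mem_iff_getElem]
          refine ⟨y.toNat - a.toNat, ?_, ?_⟩
          · rw [List.length_drop, List.length_take]
            have hmin : y.toNat < min (a + w).toNat (em[x.toNat]'hxl).toList.length :=
              Nat.lt_min.2 ⟨by omega, hy.2⟩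
            omega
          · rw [List.getElem_drop, List.getElem_take]
            congr 1
            omega
        · rw [cell_oob_y em x y hx0 hxl hy] at hcell
          exact absurd hcell (by simp)
    · have hrow : em.getD x.toNat "" = "" := by
        rw [(List.getD_eq_getElem?_getD (l := em) (i := x.toNat) (a := "")),
          List.getElem?_eq_none (by omega), Option.getD_none]
      rw [hrow]
      rw [show ("" : String).toList = [] from rfl]
      constructor
      · intro h
        simp at h
      · rintro ⟨y, _, _, hcell⟩
        rw [cell_oob_x em x y (by omega)] at hcell
        exact absurd hcell (by simp)
  · constructor
    · rintro ⟨h0, -⟩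
      exact absurd h0 hx0
    · rintro ⟨y, _, _, hcell⟩
      rw [cell_oob_x em x y (by omega)] at hcell
      exact absurd hcell (by simp)

theorem A_of (i j L : Int) (em : List String) (n dx dy : Int)
    (h0 : 0 ≤ n) (h1 : n < L) (hd : (dx, dy) ∈ directions)
    (hc : cell_has_symbol em (i + dx) (j + n + dy) = true) :
    check_for_symbol i j L em = true :=
  (A_iff i j L em).2 ⟨n, h0, h1, (dx, dy), hd, hc⟩

theorem B_le_A (i j L : Int) (em : List String) (hL : 1 ≤ L) :
    check_for_symbol_alt i j L em = true → check_for_symbol i j L em = true := by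
  intro hB
  rw [B_iff] at hB
  rcases hB with ⟨y, hy1, hy2, hc⟩ | h | h
  · have key : ∀ (dx : Int), dx = -1 ∨ dx = 1 →
        cell_has_symbol em (i + dx) y = true → check_for_symbol i j L em = true := by
      intro dx hdx hcell
      by_cases hl : y = j - 1
      · refine A_of i j L em 0 dx (-1) le_rfl (by omega) ?_ ?_
        · rcases hdx with h | h <;> subst h <;> decide
        · have e : j + 0 + -1 = y := by omega
          rw [e]; exact hcell
      · by_cases hr : y = j + L
        · refine A_of i j L em (L - 1) dx 1 (by omega) (by omega) ?_ ?_
          · rcases hdx with h | h <;> subst h <;> decide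
          · have e : j + (L - 1) + 1 = y := by omega
            rw [e]; exact hcell
        · refine A_of i j L em (y - j) dx 0 (by omega) (by omega) ?_ ?_
          · rcases hdx with h | h <;> subst h <;> decide
          · have e : j + (y - j) + 0 = y := by omega
            rw [e]; exact hcell
    rcases hc with hc | hc
    · exact key (-1) (Or.inl rfl) (by rw [show i + -1 = i - 1 by omega]; exact hc)
    · exact key 1 (Or.inr rfl) (by rw [show i + 1 = i + 1 from rfl]; exact hc)
  · refine A_of i j L em 0 0 (-1) le_rfl (by omega) (by decide) ?_
    rw [show i + 0 = i by omega, show j + 0 + -1 = j - 1 by omega]; exact h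
  · refine A_of i j L em (L - 1) 0 1 (by omega) (by omega) (by decide) ?_
    rw [show i + 0 = i by omega, show j + (L - 1) + 1 = j + L by omega]; exact h

theorem strip_A (i j L : Int) (em : List String) (hL : 2 ≤ L) (k : Int)
    (hk0 : 0 ≤ k) (hkL : k < L) (hs : cell_has_symbol em i (j + k) = true) :
    check_for_symbol i j L em = true := by
  by_cases hk : k ≤ L - 2
  · refine A_of i j L em (k + 1) 0 (-1) (by omega) (by omega) (by decide) ?_
    rw [show i + 0 = i by omega, show j + (k + 1) + -1 = j + k by omega]; exact hs
  · refine A_of i j L em (L - 2) 0 1 (by omega) (by omega) (by decide) ?_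
    rw [show i + 0 = i by omega, show j + (L - 2) + 1 = j + k by omega]; exact hs


theorem ring_false_of_D (i j L : Int) (em : List String)
    (h : D_check_for_symbol i j L em) :
    check_for_symbol_alt i j L em = false := by
  obtain ⟨hL, -, hLeft, hRight, hRows⟩ := h
  rw [show (-1 + j) = j - 1 by omega] at hLeft
  rw [show (L + j) = j + L by omega] at hRight
  rw [Bool.eq_false_iff]
  intro hB
  rw [B_iff] at hB
  rcases hB with ⟨y, hy1, hy2, hc | hc⟩ | hc | hc
  · exact hRows (i - 1) (by simp; omega)
      ((symIn_iff em (i - 1) (-1 + j) (2 + L)).2 ⟨y, by omega, by omega, hc⟩)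
  · exact hRows (i + 1) (by simp; omega)
      ((symIn_iff em (i + 1) (-1 + j) (2 + L)).2 ⟨y, by omega, by omega, hc⟩)
  · exact hLeft hc
  · exact hRight hc

theorem ringB_of_strip (i j L : Int) (em : List String) (hL2 : 2 ≤ L)
    (hD : ¬ D_check_for_symbol i j L em) (k : Int) (hk0 : 0 ≤ k) (hkL : k < L)
    (hc : cell_has_symbol em i (j + k) = true) :
    check_for_symbol_alt i j L em = true := by
  have c2 : symIn em i j L :=
    (symIn_iff em i j L).2 ⟨j + k, by omega, by omega, hc⟩
  rw [B_iff]
  by_cases hRows : ∀ x ∈ [-1 + i, 1 + i], ¬ symIn em x (-1 + j) (2 + L)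
  · by_cases h3 : cell_has_symbol em i (-1 + j) = false
    · by_cases h4 : cell_has_symbol em i (L + j) = false
      · exact absurd ⟨hL2, c2, by simp [h3], by simp [h4], hRows⟩ hD
      · have hcell := Bool.ne_false_iff.mp h4
        rw [show (L + j) = j + L by omega] at hcell
        exact Or.inr (Or.inr hcell)
    · have hcell := Bool.ne_false_iff.mp h3
      rw [show (-1 + j) = j - 1 by omega] at hcell
      exact Or.inr (Or.inl hcell)
  · push Not at hRows
    obtain ⟨x, hx, hsym⟩ := hRows
    obtain ⟨y, ha, hb, hcell⟩ := (symIn_iff em x (-1 + j) (2 + L)).1 hsym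
    simp only [List.mem_cons, List.not_mem_nil, or_false] at hx
    rcases hx with h | h <;> subst h
    · rw [show (-1 + i) = i - 1 by omega] at hcell
      exact Or.inl ⟨y, by omega, by omega, Or.inl hcell⟩
    · rw [show (1 + i) = i + 1 by omega] at hcell
      exact Or.inl ⟨y, by omega, by omega, Or.inr hcell⟩

theorem A_le_B (i j L : Int) (em : List String) (hL : 1 ≤ L)
    (hD : ¬ D_check_for_symbol i j L em) :
    check_for_symbol i j L em = true → check_for_symbol_alt i j L em = true := by
  intro hA
  rw [A_iff] at hA
  obtain ⟨n, h0, h1, d, hd, hc⟩ := hA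
  have ringB : ∀ (x y : Int), (x = i - 1 ∨ x = i + 1) → j - 1 ≤ y → y < j + L + 1 →
      cell_has_symbol em x y = true → check_for_symbol_alt i j L em = true := by
    intro x y hx hy1 hy2 hcell
    rw [B_iff]
    rcases hx with h | h <;> subst h
    · exact Or.inl ⟨y, hy1, hy2, Or.inl hcell⟩
    · exact Or.inl ⟨y, hy1, hy2, Or.inr hcell⟩
  have sideB : ∀ (y : Int), (y = j - 1 ∨ y = j + L) →
      cell_has_symbol em i y = true → check_for_symbol_alt i j L em = true := by
    intro y hy hcell
    rw [B_iff]
    rcases hy with h | h <;> subst h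
    · exact Or.inr (Or.inl hcell)
    · exact Or.inr (Or.inr hcell)
  simp only [directions, List.mem_cons, List.not_mem_nil, or_false] at hd
  rcases hd with h|h|h|h|h|h|h|h <;> subst h <;> simp only at hc
  -- (-1,-1)
  · exact ringB (i + -1) (j + n + -1) (Or.inl (by omega)) (by omega) (by omega) hc
  · exact ringB (i + -1) (j + n + 0) (Or.inl (by omega)) (by omega) (by omega) hc
  · exact ringB (i + -1) (j + n + 1) (Or.inl (by omega)) (by omega) (by omega) hc
  -- (0,-1)
  · by_cases hn : n = 0
    · rw [show i + 0 = i by omega] at hc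
      refine sideB (j + n + -1) (Or.inl (by omega)) hc
    · have hL2 : 2 ≤ L := by omega
      refine ringB_of_strip i j L em hL2 hD (n - 1) (by omega) (by omega) ?_
      rw [show j + (n - 1) = j + n + -1 by omega]
      rw [show i + 0 = i by omega] at hc
      exact hc
  -- (0,1)
  · by_cases hn : n = L - 1
    · rw [show i + 0 = i by omega] at hc
      refine sideB (j + n + 1) (Or.inr (by omega)) hc
    · have hL2 : 2 ≤ L := by omega
      refine ringB_of_strip i j L em hL2 hD (n + 1) (by omega) (by omega) ?_
      rw [show j + (n + 1) = j + n + 1 by omega]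
      rw [show i + 0 = i by omega] at hc
      exact hc
  -- (1,*)
  · exact ringB (i + 1) (j + n + -1) (Or.inr rfl) (by omega) (by omega) hc
  · exact ringB (i + 1) (j + n + 0) (Or.inr rfl) (by omega) (by omega) hc
  · exact ringB (i + 1) (j + n + 1) (Or.inr rfl) (by omega) (by omega) hc

-- ===== VERDICT (by name: the statement is the Claim_ definition above) =====
theorem check_for_symbol_spec : Claim_unchanged_check_for_symbol := by
  intro i j L em _ hPre hD
  have h1 := A_le_B i j L em hPre hD
  have h2 := B_le_A i j L em hPre
  unfold Spec_check_for_symbol at *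
  cases hA : check_for_symbol i j L em <;> cases hB : check_for_symbol_alt i j L em <;> simp_all

theorem check_for_symbol_changed : Claim_changed_check_for_symbol := by
  unfold Claim_changed_check_for_symbol; decide

theorem check_for_symbol_tight : Claim_exact_check_for_symbol := by
  intro i j L em _ _ hD
  obtain ⟨y, h1, h2, hc⟩ := (symIn_iff em i j L).1 hD.2.1
  have hA := strip_A i j L em hD.1 (y - j) (by omega) (by omega)
    (by rw [show j + (y - j) = y by omega]; exact hc)
  have hB := ring_false_of_D i j L em hD
  rw [hA, hB]
  simp
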